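-- pv_equiv track=rewrite | github.com/BingH225/Data-annotation | task_gen.py | bucket_by_situation
-- ===== SOURCE A (Python) =====
-- def normalize_situation(x) -> str:
--     if not isinstance(x, str):
--         return ""
--     return x.strip().lower()
--
-- def bucket_by_situation(pool):
--     buckets = {"attitude": [], "intent": [], "affection": []}
--     for item in pool:
--         if not isinstance(item, dict):
--             continue
--         out = item.get("output", {})
--         if not isinstance(out, dict):
--             continue
--         s = normalize_situation(out.get("situation"))
--         if s in buckets:
--             buckets[s].append(item)
--     return buckets
-- ===== SOURCE B (Python) =====
-- def bucket_by_situation(pool):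
--     def situation_key(item):
--         if not isinstance(item, dict):
--             return None
--         out = item.get("output", {})
--         if not isinstance(out, dict):
--             return None
--         s = out.get("situation")
--         return s.strip().lower() if isinstance(s, str) else ""
--     return {cat: [it for it in pool if situation_key(it) == cat]
--             for cat in ("attitude", "intent", "affection")}
-- ===== Notes on version B (the rewrite author's own statement) =====
-- stated objective: alternative
-- what changed: Replaces A's single dispatching pass that mutates a three-key dict with three independent filtered scans of pool (one comprehension per fixed category) assembled into the result dict directly.
import Mathlib
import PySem

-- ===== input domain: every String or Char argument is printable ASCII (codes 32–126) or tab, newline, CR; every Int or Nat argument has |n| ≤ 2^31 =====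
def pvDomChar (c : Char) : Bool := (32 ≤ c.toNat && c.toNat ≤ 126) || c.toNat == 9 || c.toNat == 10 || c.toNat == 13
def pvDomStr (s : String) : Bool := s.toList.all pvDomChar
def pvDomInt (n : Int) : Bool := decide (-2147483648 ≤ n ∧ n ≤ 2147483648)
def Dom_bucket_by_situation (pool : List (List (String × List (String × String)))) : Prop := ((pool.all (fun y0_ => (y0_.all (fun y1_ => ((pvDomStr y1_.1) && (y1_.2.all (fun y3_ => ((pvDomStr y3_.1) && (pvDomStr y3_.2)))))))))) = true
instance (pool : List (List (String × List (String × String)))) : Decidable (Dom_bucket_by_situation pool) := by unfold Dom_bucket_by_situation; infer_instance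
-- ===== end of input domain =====

-- B replaces A's single dispatching pass over a mutable three-key dict with three
-- independent filtered scans of pool, one per fixed category (objective: alternative).

-- ===== PORT A =====
-- helper of A: normalize_situation(x); under the type convention x is Optional[str]
-- (the non-str branch is exactly x = none), so 'not isinstance(x, str)' is 'x = none'.
def normalize_situation (x : Option String) : String :=
  match x with
  | none => ""
  | some s => PySem.Str.lower (PySem.Str.strip s)

def bucket_by_situation (pool : List (List (String × List (String × String)))) : List (String × List (List (String × List (String × String)))) :=
  (pool.foldl
    (fun buckets item =>
      let out := (PySem.Dict.mk item).getD "output" []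
      let s := normalize_situation ((PySem.Dict.mk out).get? "situation")
      if buckets.contains s then buckets.modify s [] (fun l => l ++ [item]) else buckets)
    (PySem.Dict.ofList [("attitude", []), ("intent", []), ("affection", [])])).items

-- ===== PORT B =====
-- helper of B: situation_key(item); items are dicts under the type convention, so the
-- non-dict guards of Source B never fire; s is Optional[str] (none = key missing)
def situation_key (item : List (String × List (String × String))) : String :=
  match (PySem.Dict.mk ((PySem.Dict.mk item).getD "output" [])).get? "situation" with
  | some s => PySem.Str.lower (PySem.Str.strip s)
  | none => ""

def bucket_by_situation_alt (pool : List (List (String × List (String × String)))) : List (String × List (List (String × List (String × String)))) :=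
  ["attitude", "intent", "affection"].map
    (fun cat => (cat, pool.filter (fun it => situation_key it == cat)))

-- ===== PRECONDITION & SPEC =====
def Spec_bucket_by_situation (pool : List (List (String × List (String × String)))) (out : List (String × List (List (String × List (String × String))))) : Prop := out = bucket_by_situation_alt pool
instance (pool : List (List (String × List (String × String)))) (out : List (String × List (List (String × List (String × String))))) : Decidable (Spec_bucket_by_situation pool out) := by
  unfold Spec_bucket_by_situation
  exact @instDecidableEqList _ (@instDecidableEqProd _ _ _ (@instDecidableEqList _ (@instDecidableEqList _ (inferInstance : DecidableEq (String × List (String × String)))))) out _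

-- ===== CLAIM (what is proved, stated in full; the proofs are below) =====
def Claim_equal_bucket_by_situation : Prop := ∀ (pool : List (List (String × List (String × String)))), Dom_bucket_by_situation pool → Spec_bucket_by_situation pool (bucket_by_situation pool)

-- ===== LEMMAS AND PROOFS =====

-- A's normalize_situation applied to the looked-up field is B's situation_key
theorem key_eq (item : List (String × List (String × String))) :
    normalize_situation ((PySem.Dict.mk ((PySem.Dict.mk item).getD "output" [])).get? "situation") = situation_key item := by
  unfold normalize_situation situation_key
  cases (PySem.Dict.mk ((PySem.Dict.mk item).getD "output" [])).get? "situation" <;> rfl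

-- one step of A's loop on the three-bucket dict, expressed per category
theorem step_eq (a b c : List (List (String × List (String × String))))
    (item : List (String × List (String × String))) :
    (let out := (PySem.Dict.mk item).getD "output" []
     let s := normalize_situation ((PySem.Dict.mk out).get? "situation")
     if (PySem.Dict.mk [("attitude", a), ("intent", b), ("affection", c)]).contains s then
       (PySem.Dict.mk [("attitude", a), ("intent", b), ("affection", c)]).modify s [] (fun l => l ++ [item])
     else (PySem.Dict.mk [("attitude", a), ("intent", b), ("affection", c)]))
    = PySem.Dict.mk
        [("attitude", a ++ if situation_key item == "attitude" then [item] else []),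
         ("intent", b ++ if situation_key item == "intent" then [item] else []),
         ("affection", c ++ if situation_key item == "affection" then [item] else [])] := by
  simp only [key_eq]
  by_cases h1 : situation_key item = "attitude"
  · simp [h1, PySem.Dict.contains, PySem.Dict.modify, PySem.Dict.get?, PySem.Dict.insert, PySem.Dict.getD]
  · by_cases h2 : situation_key item = "intent"
    · simp [h2, PySem.Dict.contains, PySem.Dict.modify, PySem.Dict.get?, PySem.Dict.insert, PySem.Dict.getD]
    · by_cases h3 : situation_key item = "affection"
      · simp [h3, PySem.Dict.contains, PySem.Dict.modify, PySem.Dict.get?, PySem.Dict.insert, PySem.Dict.getD]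
      · simp [PySem.Dict.contains, h1, h2, h3, Ne.symm h1, Ne.symm h2, Ne.symm h3]

-- the loop invariant: A's fold from a three-bucket dict appends, per bucket, exactly
-- the items B's filter selects for that category
theorem bucket_loop (pool : List (List (String × List (String × String))))
    (a b c : List (List (String × List (String × String)))) :
    (pool.foldl
      (fun buckets item =>
        let out := (PySem.Dict.mk item).getD "output" []
        let s := normalize_situation ((PySem.Dict.mk out).get? "situation")
        if buckets.contains s then buckets.modify s [] (fun l => l ++ [item]) else buckets)
      (PySem.Dict.mk [("attitude", a), ("intent", b), ("affection", c)])).items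
    = [("attitude", a ++ pool.filter (fun it => situation_key it == "attitude")),
       ("intent", b ++ pool.filter (fun it => situation_key it == "intent")),
       ("affection", c ++ pool.filter (fun it => situation_key it == "affection"))] := by
  induction pool generalizing a b c with
  | nil => simp
  | cons it rest ih =>
    rw [List.foldl_cons, step_eq a b c it, ih]
    simp only [List.filter_cons]
    by_cases h1 : (situation_key it == "attitude") = true <;>
      by_cases h2 : (situation_key it == "intent") = true <;>
        by_cases h3 : (situation_key it == "affection") = true <;>
          simp_all

-- ===== VERDICT (by name: the statement is the Claim_ definition above) =====
theorem bucket_by_situation_spec : Claim_equal_bucket_by_situation := by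
  intro pool _
  unfold Spec_bucket_by_situation bucket_by_situation bucket_by_situation_alt
  simpa using bucket_loop pool [] [] []
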